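-- pv_equiv track=rewrite | github.com/sdshook/Audit | SCRA/SRCA.py | create_progressive_test_data
-- ===== SOURCE A (Python) =====
-- def create_progressive_test_data(n_episodes=150):
--     """Create progressive test data for CMNN learning analysis."""
--     episodes = []
--
--     # Phase 1: Clear patterns (first third)
--     phase1_episodes = n_episodes // 3
--     clear_patterns = [
--         ("lateral_movement", "malicious"),    # Should learn ISOLATE
--         ("reconnaissance", "suspicious"),     # Should learn DEPLOY_DECOY
--         ("exfiltration", "malicious"),       # Should learn ESCALATE
--         ("persistence", "benign"),           # Should learn NO_OP
--     ]
--
--     for _ in range(phase1_episodes // len(clear_patterns) + 1):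
--         episodes.extend(clear_patterns)
--     episodes = episodes[:phase1_episodes]
--
--     # Phase 2: Ambiguous patterns (second third)
--     phase2_episodes = n_episodes // 3
--     ambiguous_patterns = [
--         ("lateral_movement", "suspicious"),   # Ambiguous
--         ("reconnaissance", "benign"),         # Ambiguous
--         ("exfiltration", "suspicious"),       # Ambiguous
--         ("persistence", "malicious"),         # Clear
--     ]
--
--     phase2_start = len(episodes)
--     for _ in range(phase2_episodes // len(ambiguous_patterns) + 1):
--         episodes.extend(ambiguous_patterns)
--     episodes = episodes[:phase2_start + phase2_episodes]
--
--     # Phase 3: Mixed complexity (remaining)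
--     remaining = n_episodes - len(episodes)
--     mixed_patterns = clear_patterns + ambiguous_patterns
--     for _ in range(remaining // len(mixed_patterns) + 1):
--         episodes.extend(mixed_patterns)
--     episodes = episodes[:n_episodes]
--
--     return episodes
-- ===== SOURCE B (Python) =====
-- def create_progressive_test_data(n_episodes=150):
--     """Create progressive test data for CMNN learning analysis."""
--     clear_patterns = [
--         ("lateral_movement", "malicious"),
--         ("reconnaissance", "suspicious"),
--         ("exfiltration", "malicious"),
--         ("persistence", "benign"),
--     ]
--     ambiguous_patterns = [
--         ("lateral_movement", "suspicious"),
--         ("reconnaissance", "benign"),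
--         ("exfiltration", "suspicious"),
--         ("persistence", "malicious"),
--     ]
--     mixed_patterns = clear_patterns + ambiguous_patterns
--     p1 = n_episodes // 3
--     p2 = n_episodes // 3
--     result = []
--     for i in range(n_episodes):
--         if i < p1:
--             result.append(clear_patterns[i % 4])
--         elif i < p1 + p2:
--             result.append(ambiguous_patterns[(i - p1) % 4])
--         else:
--             result.append(mixed_patterns[(i - p1 - p2) % 8])
--     return result
-- ===== Notes on version B (the rewrite author's own statement) =====
-- stated objective: alternative
-- what changed: B replaces A's three extend-a-block-then-truncate phases with a single index-driven loop over range(n) that picks each episode directly by modular arithmetic (i%4 within phases 1-2, offset %8 in phase 3).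
import Mathlib
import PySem

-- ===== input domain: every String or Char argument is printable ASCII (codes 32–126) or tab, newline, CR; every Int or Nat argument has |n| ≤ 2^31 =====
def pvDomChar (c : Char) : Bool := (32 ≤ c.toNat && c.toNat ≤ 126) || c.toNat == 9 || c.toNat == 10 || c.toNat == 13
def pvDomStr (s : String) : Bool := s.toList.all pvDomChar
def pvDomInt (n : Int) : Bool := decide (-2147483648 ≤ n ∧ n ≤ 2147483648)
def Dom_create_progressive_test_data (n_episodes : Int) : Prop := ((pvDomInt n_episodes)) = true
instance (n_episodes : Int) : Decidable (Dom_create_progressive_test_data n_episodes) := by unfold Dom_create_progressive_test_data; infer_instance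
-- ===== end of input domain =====

-- B rebuilds the episode list in one index-driven pass over range(n) using modular
-- arithmetic per phase, instead of A's extend-then-truncate block construction
-- (same result; a different decomposition, not claimed faster).


-- ===== PORT A =====
-- the two pattern-list literals shared by both Pythons
def pvClearPatterns : List (String × String) :=
  [("lateral_movement", "malicious"), ("reconnaissance", "suspicious"),
   ("exfiltration", "malicious"), ("persistence", "benign")]
def pvAmbiguousPatterns : List (String × String) :=
  [("lateral_movement", "suspicious"), ("reconnaissance", "benign"),
   ("exfiltration", "suspicious"), ("persistence", "malicious")]

def create_progressive_test_data (n_episodes : Int) : List (String × String) :=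
  let episodes : List (String × String) := []
  -- Phase 1: clear patterns (first third); 4 = len(clear_patterns)
  let phase1_episodes := PySem.Int.floordiv n_episodes 3
  let episodes := (PySem.List.pyRange 0 (PySem.Int.floordiv phase1_episodes 4 + 1) 1).foldl
    (fun acc _ => acc ++ pvClearPatterns) episodes
  let episodes := PySem.List.slice episodes none (some phase1_episodes)
  -- Phase 2: ambiguous patterns (second third); 4 = len(ambiguous_patterns)
  let phase2_episodes := PySem.Int.floordiv n_episodes 3
  let phase2_start : Int := episodes.length
  let episodes := (PySem.List.pyRange 0 (PySem.Int.floordiv phase2_episodes 4 + 1) 1).foldl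
    (fun acc _ => acc ++ pvAmbiguousPatterns) episodes
  let episodes := PySem.List.slice episodes none (some (phase2_start + phase2_episodes))
  -- Phase 3: mixed complexity (remaining); 8 = len(mixed_patterns)
  let remaining := n_episodes - (episodes.length : Int)
  let mixed_patterns := pvClearPatterns ++ pvAmbiguousPatterns
  let episodes := (PySem.List.pyRange 0 (PySem.Int.floordiv remaining 8 + 1) 1).foldl
    (fun acc _ => acc ++ mixed_patterns) episodes
  PySem.List.slice episodes none (some n_episodes)

-- ===== PORT B =====
def create_progressive_test_data_alt (n_episodes : Int) : List (String × String) :=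
  let mixed_patterns := pvClearPatterns ++ pvAmbiguousPatterns
  let p1 := PySem.Int.floordiv n_episodes 3
  let p2 := PySem.Int.floordiv n_episodes 3
  (PySem.List.pyRange 0 n_episodes 1).foldl (fun result i =>
    if i < p1 then
      result ++ [PySem.List.pyGetD pvClearPatterns (PySem.Int.mod i 4) ("", "")]
    else if i < p1 + p2 then
      result ++ [PySem.List.pyGetD pvAmbiguousPatterns (PySem.Int.mod (i - p1) 4) ("", "")]
    else
      result ++ [PySem.List.pyGetD mixed_patterns (PySem.Int.mod (i - p1 - p2) 8) ("", "")]) []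

-- ===== PRECONDITION & SPEC =====
def Spec_create_progressive_test_data (n_episodes : Int) (out : List (String × String)) : Prop := out = create_progressive_test_data_alt n_episodes
instance (n_episodes : Int) (out : List (String × String)) : Decidable (Spec_create_progressive_test_data n_episodes out) := by unfold Spec_create_progressive_test_data; infer_instance

-- ===== CLAIM (what is proved, stated in full; the proofs are below) =====
def Claim_equal_create_progressive_test_data : Prop := ∀ (n_episodes : Int), Dom_create_progressive_test_data n_episodes → Spec_create_progressive_test_data n_episodes (create_progressive_test_data n_episodes)

-- ===== LEMMAS AND PROOFS =====

-- cyclic read of the first m entries of an endlessly repeated pattern list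
def pvCyc (P : List (String × String)) (m : Nat) : List (String × String) :=
  (List.range m).map (fun j => P.getD (j % P.length) ("", ""))

theorem pvCyc_length (P : List (String × String)) (m : Nat) : (pvCyc P m).length = m := by
  simp [pvCyc]

theorem pvFoldl_extend {β : Type} (l : List β) (P s : List (String × String)) :
    l.foldl (fun acc _ => acc ++ P) s = s ++ (List.replicate l.length P).flatten := by
  induction l generalizing s with
  | nil => simp
  | cons x t ih => simp [ih, List.replicate_succ]

theorem pvCyc_range_eq (P : List (String × String)) (m : Nat) (hm : m ≤ P.length) :
    (List.range m).map (fun j => P.getD (j % P.length) ("", "")) = P.take m := by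
  apply List.ext_getElem
  · simp [min_eq_left hm]
  · intro i h1 h2
    simp only [List.getElem_map, List.getElem_range, List.getElem_take]
    rw [Nat.mod_eq_of_lt (by simp at h1 ⊢; omega)]
    rw [List.getD_eq_getElem _ _ (by simp at h1 ⊢; omega)]

theorem pvCyc_split (P : List (String × String)) (_hP : P.length ≠ 0) (m : Nat) (hm : P.length ≤ m) :
    pvCyc P m = P ++ pvCyc P (m - P.length) := by
  unfold pvCyc
  have hsplit : m = P.length + (m - P.length) := by omega
  rw [hsplit, List.range_add, List.map_append, List.map_map]
  have h2 : P.length + (m - P.length) - P.length = m - P.length := by omega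
  rw [h2]
  congr 1
  · rw [pvCyc_range_eq P P.length le_rfl, List.take_length]
  · apply List.map_congr_left
    intro j _
    simp [Nat.add_mod_left]

theorem pvFlatten_take (P : List (String × String)) (hP : P.length ≠ 0) :
    ∀ (c m : Nat), m ≤ c * P.length → ((List.replicate c P).flatten).take m = pvCyc P m := by
  intro c
  induction c with
  | zero =>
    intro m hm
    have : m = 0 := by omega
    simp [this, pvCyc]
  | succ c ih =>
    intro m hm
    rw [List.replicate_succ, List.flatten_cons, List.take_append]
    by_cases h : m ≤ P.length
    · have hz : m - P.length = 0 := by omega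
      rw [hz]
      simp only [List.take_zero, List.append_nil]
      rw [show (pvCyc P m) = _ from rfl, pvCyc, pvCyc_range_eq P m h]
    · rw [List.take_of_length_le (by omega), ih (m - P.length) (by
        have hmul : (c + 1) * P.length = c * P.length + P.length := by ring
        omega)]
      rw [pvCyc_split P hP m (by omega)]

-- the branch-selecting body of B's loop, factored for the fold-to-map step
def pvF (m : Nat) (i : Int) : String × String :=
  if i < PySem.Int.floordiv (m : Int) 3 then
    PySem.List.pyGetD pvClearPatterns (PySem.Int.mod i 4) ("", "")
  else if i < PySem.Int.floordiv (m : Int) 3 + PySem.Int.floordiv (m : Int) 3 then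
    PySem.List.pyGetD pvAmbiguousPatterns (PySem.Int.mod (i - PySem.Int.floordiv (m : Int) 3) 4) ("", "")
  else
    PySem.List.pyGetD (pvClearPatterns ++ pvAmbiguousPatterns)
      (PySem.Int.mod (i - PySem.Int.floordiv (m : Int) 3 - PySem.Int.floordiv (m : Int) 3) 8) ("", "")

theorem pvStage1 (m : Nat) :
    PySem.List.slice
        ((PySem.List.pyRange 0 (PySem.Int.floordiv (PySem.Int.floordiv (m : Int) 3) 4 + 1) 1).foldl
          (fun acc _ => acc ++ pvClearPatterns) [])
        none (some (PySem.Int.floordiv (m : Int) 3)) = pvCyc pvClearPatterns (m / 3) := by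
  have hq : PySem.Int.floordiv (m : Int) 3 = ((m / 3 : Nat) : Int) := by
    exact_mod_cast PySem.Int.floordiv_natCast m 3
  have hq4 : PySem.Int.floordiv ((m / 3 : Nat) : Int) 4 = ((m / 3 / 4 : Nat) : Int) := by
    exact_mod_cast PySem.Int.floordiv_natCast (m / 3) 4
  have hc1 : ((m / 3 / 4 : Nat) : Int) + 1 = ((m / 3 / 4 + 1 : Nat) : Int) := by push_cast; ring
  rw [hq, hq4, hc1, PySem.List.pyRange_zero_natCast, pvFoldl_extend, List.nil_append,
      PySem.List.slice_to_natCast]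
  simp only [List.length_map, List.length_range]
  exact pvFlatten_take pvClearPatterns (by decide) _ _ (by show m / 3 ≤ (m / 3 / 4 + 1) * 4; omega)

theorem pvStage2 (m : Nat) :
    PySem.List.slice
        ((PySem.List.pyRange 0 (PySem.Int.floordiv (PySem.Int.floordiv (m : Int) 3) 4 + 1) 1).foldl
          (fun acc _ => acc ++ pvAmbiguousPatterns) (pvCyc pvClearPatterns (m / 3)))
        none (some (((pvCyc pvClearPatterns (m / 3)).length : Int) + PySem.Int.floordiv (m : Int) 3))
      = pvCyc pvClearPatterns (m / 3) ++ pvCyc pvAmbiguousPatterns (m / 3) := by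
  have hq : PySem.Int.floordiv (m : Int) 3 = ((m / 3 : Nat) : Int) := by
    exact_mod_cast PySem.Int.floordiv_natCast m 3
  have hq4 : PySem.Int.floordiv ((m / 3 : Nat) : Int) 4 = ((m / 3 / 4 : Nat) : Int) := by
    exact_mod_cast PySem.Int.floordiv_natCast (m / 3) 4
  have hc1 : ((m / 3 / 4 : Nat) : Int) + 1 = ((m / 3 / 4 + 1 : Nat) : Int) := by push_cast; ring
  have hc2 : ((m / 3 : Nat) : Int) + ((m / 3 : Nat) : Int) = ((m / 3 + m / 3 : Nat) : Int) := by
    push_cast; ring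
  rw [pvCyc_length, hq, hq4, hc1, hc2, PySem.List.pyRange_zero_natCast, pvFoldl_extend,
      PySem.List.slice_to_natCast, List.take_append, pvCyc_length,
      List.take_of_length_le (by rw [pvCyc_length]; omega),
      show m / 3 + m / 3 - m / 3 = m / 3 from by omega]
  simp only [List.length_map, List.length_range]
  rw [pvFlatten_take pvAmbiguousPatterns (by decide) _ _
      (by show m / 3 ≤ (m / 3 / 4 + 1) * 4; omega)]

theorem pvStage3 (m : Nat) :
    PySem.List.slice
        ((PySem.List.pyRange 0 (PySem.Int.floordiv
            ((m : Int) - (((pvCyc pvClearPatterns (m / 3) ++ pvCyc pvAmbiguousPatterns (m / 3)).length : Int)) ) 8 + 1) 1).foldl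
          (fun acc _ => acc ++ (pvClearPatterns ++ pvAmbiguousPatterns))
          (pvCyc pvClearPatterns (m / 3) ++ pvCyc pvAmbiguousPatterns (m / 3)))
        none (some (m : Int))
      = pvCyc pvClearPatterns (m / 3) ++ pvCyc pvAmbiguousPatterns (m / 3) ++
          pvCyc (pvClearPatterns ++ pvAmbiguousPatterns) (m - 2 * (m / 3)) := by
  have h2q : 2 * (m / 3) ≤ m := by omega
  have hlen : ((pvCyc pvClearPatterns (m / 3) ++ pvCyc pvAmbiguousPatterns (m / 3)).length : Int)
      = ((m / 3 + m / 3 : Nat) : Int) := by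
    rw [List.length_append, pvCyc_length, pvCyc_length]
  have hr : (m : Int) - ((m / 3 + m / 3 : Nat) : Int) = ((m - 2 * (m / 3) : Nat) : Int) := by
    push_cast [h2q]; omega
  have hr8 : PySem.Int.floordiv ((m - 2 * (m / 3) : Nat) : Int) 8
      = (((m - 2 * (m / 3)) / 8 : Nat) : Int) := by
    exact_mod_cast PySem.Int.floordiv_natCast (m - 2 * (m / 3)) 8
  have hc3 : (((m - 2 * (m / 3)) / 8 : Nat) : Int) + 1
      = (((m - 2 * (m / 3)) / 8 + 1 : Nat) : Int) := by push_cast; ring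
  rw [hlen, hr, hr8, hc3, PySem.List.pyRange_zero_natCast, pvFoldl_extend,
      PySem.List.slice_to_natCast, List.take_append, List.length_append, pvCyc_length, pvCyc_length,
      List.take_of_length_le (by simp [pvCyc_length]; omega),
      show m - (m / 3 + m / 3) = m - 2 * (m / 3) from by omega]
  simp only [List.length_map, List.length_range]
  rw [pvFlatten_take (pvClearPatterns ++ pvAmbiguousPatterns) (by decide) _ _
      (by show m - 2 * (m / 3) ≤ ((m - 2 * (m / 3)) / 8 + 1) * 8; omega)]

theorem pvA_nat (m : Nat) :
    create_progressive_test_data (m : Int) =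
      pvCyc pvClearPatterns (m / 3) ++ pvCyc pvAmbiguousPatterns (m / 3) ++
        pvCyc (pvClearPatterns ++ pvAmbiguousPatterns) (m - 2 * (m / 3)) := by
  unfold create_progressive_test_data
  simp only []
  rw [pvStage1 m, pvStage2 m, pvStage3 m]

theorem pvB_nat (m : Nat) :
    create_progressive_test_data_alt (m : Int) =
      pvCyc pvClearPatterns (m / 3) ++ pvCyc pvAmbiguousPatterns (m / 3) ++
        pvCyc (pvClearPatterns ++ pvAmbiguousPatterns) (m - 2 * (m / 3)) := by
  have hq : PySem.Int.floordiv (m : Int) 3 = ((m / 3 : Nat) : Int) := by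
    exact_mod_cast PySem.Int.floordiv_natCast m 3
  unfold create_progressive_test_data_alt
  simp only []
  rw [show (fun (result : List (String × String)) (i : Int) =>
        if i < PySem.Int.floordiv (m : Int) 3 then
          result ++ [PySem.List.pyGetD pvClearPatterns (PySem.Int.mod i 4) ("", "")]
        else if i < PySem.Int.floordiv (m : Int) 3 + PySem.Int.floordiv (m : Int) 3 then
          result ++ [PySem.List.pyGetD pvAmbiguousPatterns
            (PySem.Int.mod (i - PySem.Int.floordiv (m : Int) 3) 4) ("", "")]
        else
          result ++ [PySem.List.pyGetD (pvClearPatterns ++ pvAmbiguousPatterns)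
            (PySem.Int.mod (i - PySem.Int.floordiv (m : Int) 3 - PySem.Int.floordiv (m : Int) 3) 8)
            ("", "")]) = (fun result i => result ++ [pvF m i]) from by
      funext r i; unfold pvF; split_ifs <;> rfl]
  rw [PySem.List.foldl_append_singleton_eq_map, List.nil_append,
      PySem.List.pyRange_zero_natCast, List.map_map]
  have h2q : 2 * (m / 3) ≤ m := by omega
  have hrange : List.range m = List.range (m / 3) ++
      ((List.range (m / 3) ++ (List.range (m - 2 * (m / 3))).map
        (fun x => m / 3 + x)).map (fun x => m / 3 + x)) := by
    rw [← List.range_add, ← List.range_add]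
    congr 1
    omega
  rw [hrange]
  simp only [List.map_append, List.map_map]
  rw [List.append_assoc]
  congr 1
  · unfold pvCyc
    apply List.map_congr_left
    intro j hj
    rw [List.mem_range] at hj
    have hlt : ((j : Nat) : Int) < ((m / 3 : Nat) : Int) := by exact_mod_cast hj
    simp only [Function.comp, pvF, hq, if_pos hlt]
    have hm4 : PySem.Int.mod ((j : Nat) : Int) 4 = ((j % 4 : Nat) : Int) := by
      exact_mod_cast PySem.Int.mod_natCast j 4
    rw [hm4, PySem.List.pyGetD_natCast]
    rfl
  congr 1
  · unfold pvCyc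
    apply List.map_congr_left
    intro j hj
    rw [List.mem_range] at hj
    simp only [Function.comp, pvF, hq]
    rw [if_neg (by push_cast; omega), if_pos (by push_cast; omega)]
    have hsub : ((m / 3 + j : Nat) : Int) - ((m / 3 : Nat) : Int) = ((j : Nat) : Int) := by
      push_cast; ring
    rw [hsub]
    have hm4 : PySem.Int.mod ((j : Nat) : Int) 4 = ((j % 4 : Nat) : Int) := by
      exact_mod_cast PySem.Int.mod_natCast j 4
    rw [hm4, PySem.List.pyGetD_natCast]
    rfl
  · unfold pvCyc
    apply List.map_congr_left
    intro j hj
    rw [List.mem_range] at hj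
    simp only [Function.comp, pvF, hq]
    rw [if_neg (by push_cast; omega), if_neg (by push_cast; omega)]
    have hsub : ((m / 3 + (m / 3 + j) : Nat) : Int) - ((m / 3 : Nat) : Int) - ((m / 3 : Nat) : Int)
        = ((j : Nat) : Int) := by push_cast; ring
    rw [hsub]
    have hm8 : PySem.Int.mod ((j : Nat) : Int) 8 = ((j % 8 : Nat) : Int) := by
      exact_mod_cast PySem.Int.mod_natCast j 8
    rw [hm8, PySem.List.pyGetD_natCast]
    rfl

theorem pvA_neg (n : Int) (h : n < 0) : create_progressive_test_data n = [] := by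
  have h1 : PySem.Int.floordiv n 3 ≤ -1 := by
    rw [PySem.Int.floordiv_eq_ediv_of_pos (by omega : (0:Int) < 3)]; omega
  have h2 : PySem.Int.floordiv (PySem.Int.floordiv n 3) 4 + 1 ≤ 0 := by
    rw [PySem.Int.floordiv_eq_ediv_of_pos (by omega : (0:Int) < 4)]; omega
  have s1 : PySem.List.slice ([] : List (String × String)) none (some (PySem.Int.floordiv n 3)) = [] := by
    simp [PySem.List.slice]
  unfold create_progressive_test_data
  simp only []
  rw [PySem.List.pyRange_one_eq_nil h2]
  simp only [List.foldl_nil, s1, List.length_nil, Nat.cast_zero, zero_add, Int.sub_zero]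
  have h3 : PySem.Int.floordiv n 8 + 1 ≤ 0 := by
    rw [PySem.Int.floordiv_eq_ediv_of_pos (by omega : (0:Int) < 8)]; omega
  rw [PySem.List.pyRange_one_eq_nil h3]
  simp only [List.foldl_nil]
  simp [PySem.List.slice]

theorem pvB_neg (n : Int) (h : n < 0) : create_progressive_test_data_alt n = [] := by
  unfold create_progressive_test_data_alt
  simp only []
  rw [PySem.List.pyRange_one_eq_nil (by omega), List.foldl_nil]

-- ===== VERDICT (by name: the statement is the Claim_ definition above) =====
theorem create_progressive_test_data_spec : Claim_equal_create_progressive_test_data := by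
  intro n _
  unfold Spec_create_progressive_test_data
  by_cases h : 0 ≤ n
  · obtain ⟨m, rfl⟩ : ∃ m : Nat, n = (m : Int) := ⟨n.toNat, (Int.toNat_of_nonneg h).symm⟩
    rw [pvA_nat, pvB_nat]
  · rw [pvA_neg n (by omega), pvB_neg n (by omega)]
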